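-- pv_equiv track=rewrite | github.com/Joody20/codingTests | 벡준/No.2504.py | solution
-- ===== SOURCE A (Python) =====
-- def solution(s):
--     stack = []  # 올바른괄호인지 올바르지 않은 괄호인지 판단하기 위한 스택
--     num = 0 # 결과를 리턴할 숫자
--     tmp = 1 # 중간과정을 계산할 숫자
--
--     for i, char in enumerate(s):
--         if(char == "("):  # 괄호가 열릴 때는 곱하고
--             stack.append("(")
--             tmp *= 2  # 일단 ( 이 괄호일 때는 2를 곱하는 거니까 일단 곱하고
--         elif(char == ")"):  # 괄호가 닫힐 때는 나누고
--             if not stack or stack[-1] != "(":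
--                 return 0
--             if s[i-1] == '(':  # 지금 전거가 (이면 num + tmp를 해
--                 num += tmp
--             stack.pop()  # stack에서 빼고
--             tmp //= 2  # 2를 나눠
--         elif(char == "["):
--             stack.append("[")
--             tmp *= 3  # 3을 곱하고
--         elif(char == "]"):
--             if not stack or stack[-1] != "[":
--                 return 0
--             if s[i - 1] == '[':  #전거가 [이면 더하고
--                 num += tmp
--             stack.pop()  # 빼주고
--             tmp //= 3  # 나누고
--         else:
--             return 0
--
--     if stack:
--         return 0
--
--     return num
-- ===== SOURCE B (Python) =====
-- def solution(s):
--     stack = []  # holds '(' / '[' markers or integer subexpression values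
--     for c in s:
--         if c == '(' or c == '[':
--             stack.append(c)
--         elif c == ')' or c == ']':
--             inner = 0
--             while stack and isinstance(stack[-1], int):
--                 inner += stack.pop()
--             want = '(' if c == ')' else '['
--             if not stack or stack[-1] != want:
--                 return 0
--             stack.pop()
--             base = 2 if c == ')' else 3
--             stack.append(base if inner == 0 else inner * base)
--         else:
--             return 0
--     if any(isinstance(x, str) for x in stack):
--         return 0
--     return sum(stack)
-- ===== Notes on version B (the rewrite author's own statement) =====
-- stated objective: alternative
-- what changed: A tracks a running multiplier tmp, an accumulator num and a marker-only stack, adding tmp on empty pairs detected via s[i-1]; B instead keeps a single stack of open-bracket markers and integer subexpression values, folding closed groups into values on the stack and summing the stack at the end.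
import Mathlib
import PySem

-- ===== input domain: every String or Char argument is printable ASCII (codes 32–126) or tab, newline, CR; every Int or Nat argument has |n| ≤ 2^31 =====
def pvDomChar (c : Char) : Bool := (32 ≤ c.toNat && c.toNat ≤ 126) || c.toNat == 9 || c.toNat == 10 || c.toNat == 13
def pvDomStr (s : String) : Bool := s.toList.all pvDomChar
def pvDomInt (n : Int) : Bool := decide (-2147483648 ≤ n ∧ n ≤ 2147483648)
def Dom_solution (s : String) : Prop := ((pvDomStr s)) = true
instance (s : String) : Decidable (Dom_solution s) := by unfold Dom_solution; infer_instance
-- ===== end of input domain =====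

-- B replaces A's scalar multiplier/marker-stack bookkeeping by a single stack of markers
-- and subexpression values (objective: alternative data-structure formulation, same cost).

-- ===== PORT A =====
-- literal transliteration of A: loop over enumerate(s) carrying the marker stack,
-- the accumulator num and the running multiplier tmp; s[i-1] is pyGet? (Python semantics).
def solutionLoop (cs : List Char) (rem : List Char) (i : Nat) (stack : List Char)
    (num tmp : Int) : Int :=
  match rem with
  | [] => if stack ≠ [] then 0 else num
  | c :: rest =>
    if c = '(' then
      solutionLoop cs rest (i+1) ('(' :: stack) num (tmp * 2)
    else if c = ')' then
      match stack with
      | [] => 0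
      | t :: st =>
        if t ≠ '(' then 0
        else
          let num' := if PySem.List.pyGet? cs ((i : Int) - 1) = some '(' then num + tmp else num
          solutionLoop cs rest (i+1) st num' (PySem.Int.floordiv tmp 2)
    else if c = '[' then
      solutionLoop cs rest (i+1) ('[' :: stack) num (tmp * 3)
    else if c = ']' then
      match stack with
      | [] => 0
      | t :: st =>
        if t ≠ '[' then 0
        else
          let num' := if PySem.List.pyGet? cs ((i : Int) - 1) = some '[' then num + tmp else num
          solutionLoop cs rest (i+1) st num' (PySem.Int.floordiv tmp 3)
    else 0

def solution (s : String) : Int :=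
  solutionLoop s.toList s.toList 0 [] 0 1

-- ===== PORT B =====
-- inner-sum pop: pop all consecutive integer values off the top of the stack (Source B's while loop)
def altPopInts : List (Char ⊕ Int) → Int × List (Char ⊕ Int)
  | .inr v :: r => (v + (altPopInts r).1, (altPopInts r).2)
  | st => (0, st)

-- Source B's for loop over the characters, carrying the mixed marker/value stack
def altLoop : List Char → List (Char ⊕ Int) → Int
  | [], st =>
      if st.any Sum.isLeft then 0
      else st.foldl (fun a x => a + Sum.elim (fun _ => 0) id x) 0
  | c :: rest, st =>
    if c = '(' ∨ c = '[' then altLoop rest (Sum.inl c :: st)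
    else if c = ')' ∨ c = ']' then
      let p := altPopInts st
      let want := if c = ')' then '(' else '['
      match p.2 with
      | .inl t :: st' =>
        if t = want then
          let base : Int := if c = ')' then 2 else 3
          altLoop rest (Sum.inr (if p.1 = 0 then base else p.1 * base) :: st')
        else 0
      | _ => 0
    else 0

def solution_alt (s : String) : Int := altLoop s.toList []

-- ===== PRECONDITION & SPEC =====
def Spec_solution (s : String) (out : Int) : Prop := out = solution_alt s
instance (s : String) (out : Int) : Decidable (Spec_solution s out) := by unfold Spec_solution; infer_instance

-- ===== CLAIM (what is proved, stated in full; the proofs are below) =====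
def Claim_equal_solution : Prop := ∀ (s : String), Dom_solution s → Spec_solution s (solution s)

-- ===== LEMMAS AND PROOFS =====

-- weight of a bracket marker
def wt (c : Char) : Int := if c = '(' then 2 else 3

-- markers of B's stack, top first (= A's stack)
def smark : List (Char ⊕ Int) → List Char
  | [] => []
  | .inl c :: r => c :: smark r
  | .inr _ :: r => smark r

-- product of all marker weights (= A's tmp)
def sprod : List (Char ⊕ Int) → Int
  | [] => 1
  | .inl c :: r => wt c * sprod r
  | .inr _ :: r => sprod r

-- each value weighted by the markers below it (= A's num)
def scontrib : List (Char ⊕ Int) → Int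
  | [] => 0
  | .inl _ :: r => scontrib r
  | .inr v :: r => v * sprod r + scontrib r

-- relation between the last processed char and the top of B's stack
def TopOK (pre : List Char) (st : List (Char ⊕ Int)) : Prop :=
  match pre.getLast?, st with
  | none, [] => True
  | some c, .inl c' :: _ => c' = c
  | some c, .inr _ :: _ => c = ')' ∨ c = ']'
  | _, _ => False

lemma sprod_pop (st : List (Char ⊕ Int)) : sprod (altPopInts st).2 = sprod st := by
  induction st with
  | nil => rfl
  | cons x r ih => cases x with
    | inl c => rfl
    | inr v => simpa [altPopInts, sprod] using ih

lemma scontrib_pop (st : List (Char ⊕ Int)) :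
    scontrib st = (altPopInts st).1 * sprod st + scontrib (altPopInts st).2 := by
  induction st with
  | nil => simp [altPopInts, scontrib]
  | cons x r ih => cases x with
    | inl c => simp [altPopInts, scontrib]
    | inr v =>
      simp only [altPopInts, scontrib, sprod]
      rw [ih]; ring

lemma pop_nonneg (st : List (Char ⊕ Int)) (h : ∀ v, Sum.inr v ∈ st → 0 < v) :
    0 ≤ (altPopInts st).1 := by
  induction st with
  | nil => simp [altPopInts]
  | cons x r ih => cases x with
    | inl c => simp [altPopInts]
    | inr v =>
      have hv := h v (by simp)
      have := ih (fun w hw => h w (by simp [hw]))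
      simp only [altPopInts]
      linarith

lemma pop_mem (v : Int) (st : List (Char ⊕ Int)) (h : Sum.inr v ∈ (altPopInts st).2) :
    Sum.inr v ∈ st := by
  induction st with
  | nil => simp [altPopInts] at h
  | cons x r ih => cases x with
    | inl c => simpa [altPopInts] using h
    | inr w => simp only [altPopInts] at h; exact List.mem_cons_of_mem _ (ih h)

lemma pop_of_no_marks (st : List (Char ⊕ Int)) (h : smark st = []) :
    (altPopInts st).2 = [] := by
  induction st with
  | nil => rfl
  | cons x r ih => cases x with
    | inl c => simp [smark] at h
    | inr v => simpa [altPopInts] using ih (by simpa [smark] using h)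

lemma pop_struct (st : List (Char ⊕ Int)) (t : Char) (ms : List Char)
    (h : smark st = t :: ms) :
    ∃ st', (altPopInts st).2 = Sum.inl t :: st' ∧ smark st' = ms := by
  induction st with
  | nil => simp [smark] at h
  | cons x r ih => cases x with
    | inl c =>
      simp only [smark] at h
      injection h with h1 h2
      subst h1
      exact ⟨r, by simp [altPopInts], h2⟩
    | inr v =>
      simp only [smark] at h
      obtain ⟨st', h1, h2⟩ := ih h
      exact ⟨st', by simpa [altPopInts] using h1, h2⟩

lemma pop_pos (v : Int) (r : List (Char ⊕ Int))
    (h : ∀ w, Sum.inr w ∈ (Sum.inr v :: r) → 0 < w) :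
    0 < (altPopInts (Sum.inr v :: r)).1 := by
  have hv := h v (by simp)
  have := pop_nonneg r (fun w hw => h w (by simp [hw]))
  simp only [altPopInts]
  linarith

lemma sprod_no_marks (st : List (Char ⊕ Int)) (h : smark st = []) : sprod st = 1 := by
  induction st with
  | nil => rfl
  | cons x r ih => cases x with
    | inl c => simp [smark] at h
    | inr v => simpa [sprod] using ih (by simpa [smark] using h)

lemma any_isLeft_iff (st : List (Char ⊕ Int)) :
    st.any Sum.isLeft = false ↔ smark st = [] := by
  induction st with
  | nil => simp [smark]
  | cons x r ih => cases x with
    | inl c => simp [smark]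
    | inr v => simpa [smark] using ih

lemma foldl_sum_no_marks (st : List (Char ⊕ Int)) (h : smark st = []) : ∀ a : Int,
    st.foldl (fun a x => a + Sum.elim (fun _ => 0) id x) a = a + scontrib st := by
  induction st with
  | nil => simp [scontrib]
  | cons x r ih =>
    cases x with
    | inl c => simp [smark] at h
    | inr v =>
      intro a
      have hr : smark r = [] := by simpa [smark] using h
      simp only [List.foldl_cons, Sum.elim_inr, id, scontrib, sprod_no_marks r hr]
      rw [ih hr]
      ring

lemma pyGet?_pre_last (pre xs : List Char) (h : pre ≠ []) :
    PySem.List.pyGet? (pre ++ xs) ((pre.length : Int) - 1) = pre.getLast? := by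
  obtain ⟨q, y, rfl⟩ := List.eq_nil_or_concat pre |>.resolve_left h
  simp only [List.concat_eq_append]
  have h1 : ((q ++ [y]).length : Int) - 1 = (q.length : Int) := by simp
  rw [h1, List.append_assoc, List.singleton_append, PySem.List.pyGet?_append_length]
  simp

lemma floordiv_cancel (k x : Int) (hk : 0 < k) : PySem.Int.floordiv (k * x) k = x := by
  rw [PySem.Int.floordiv_eq_ediv_of_pos hk, Int.mul_ediv_cancel_left x (by omega)]

lemma close_case (rest pre : List Char) (cl o : Char) (k : Int) (hk : 0 < k)
    (hwt : wt o = k) (hcl : cl = ')' ∨ cl = ']') (ho : o = '(' ∨ o = '[')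
    (st : List (Char ⊕ Int))
    (hpos : ∀ v, Sum.inr v ∈ st → 0 < v) (htop : TopOK pre st)
    (ih : ∀ (pre : List Char) (st : List (Char ⊕ Int)),
      (∀ v, Sum.inr v ∈ st → 0 < v) → TopOK pre st →
      solutionLoop (pre ++ rest) rest pre.length (smark st) (scontrib st) (sprod st)
        = altLoop rest st) :
    (match smark st with
     | [] => 0
     | t :: st1 =>
       if t ≠ o then 0
       else
         solutionLoop (pre ++ cl :: rest) rest (pre.length + 1) st1
           (if PySem.List.pyGet? (pre ++ cl :: rest) ((pre.length : Int) - 1) = some o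
            then scontrib st + sprod st else scontrib st)
           (PySem.Int.floordiv (sprod st) k))
    = (match (altPopInts st).2 with
       | .inl t :: st' =>
         if t = o then
           altLoop rest
             (Sum.inr (if (altPopInts st).1 = 0 then k else (altPopInts st).1 * k) :: st')
         else 0
       | _ => 0) := by
  rcases hm : smark st with _ | ⟨t, ms⟩
  · rw [pop_of_no_marks st hm]
  · obtain ⟨st', hpop, hms⟩ := pop_struct st t ms hm
    rw [hpop]
    by_cases ht : t = o
    · subst ht
      show (if t ≠ t then (0:Int) else _) = (if t = t then _ else 0)
      rw [if_neg (by simp), if_pos rfl]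
      have hsp : sprod st = k * sprod st' := by
        rw [← sprod_pop st, hpop]; simp [sprod, hwt]
      have hpos' : ∀ v, Sum.inr v ∈ st' → 0 < v := fun v hv =>
        hpos v (pop_mem v st (hpop ▸ List.mem_cons_of_mem _ hv))
      have hstne : st ≠ [] := by intro h; rw [h] at hm; simp [smark] at hm
      have hpre : pre ≠ [] := by
        intro h
        subst h
        cases st with
        | nil => exact hstne rfl
        | cons x r => cases x <;> simp [TopOK] at htop
      have hget : PySem.List.pyGet? (pre ++ cl :: rest) ((pre.length : Int) - 1)
          = pre.getLast? := pyGet?_pre_last pre (cl :: rest) hpre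
      have hdiv : PySem.Int.floordiv (sprod st) k = sprod st' := by
        rw [hsp]; exact floordiv_cancel k (sprod st') hk
      cases st with
      | nil => exact absurd rfl hstne
      | cons x r =>
        cases x with
        | inl c0 =>
          have he : altPopInts (Sum.inl c0 :: r) = (0, Sum.inl c0 :: r) := rfl
          rw [he] at hpop
          simp only [List.cons.injEq, Sum.inl.injEq] at hpop
          have hc0 : c0 = t := hpop.1
          have hr : r = st' := hpop.2
          subst hc0
          subst hr
          rcases hgl : pre.getLast? with _ | cL
          · exfalso; simp [TopOK, hgl] at htop
          · have hc : c0 = cL := by simpa [TopOK, hgl] using htop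
            rw [hget, hgl, if_pos (by rw [hc]), hdiv, he]
            have h := ih (pre ++ [cl]) (Sum.inr k :: r)
              (by
                intro v hv
                rcases List.mem_cons.1 hv with h | h
                · injection h with h; omega
                · exact hpos' v h)
              (by
                rcases hcl with h | h <;>
                  simp [TopOK, List.getLast?_append, h])
            simp only [List.append_assoc, List.singleton_append, List.length_append,
              List.length_cons, List.length_nil, smark, scontrib, sprod] at h
            rw [hms] at h
            simp only [scontrib, sprod, hwt, if_true]
            rw [show scontrib r + k * sprod r = k * sprod r + scontrib r from by
              ring]
            exact h
        | inr v0 =>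
          have hinner : 0 < (altPopInts (Sum.inr v0 :: r)).1 := pop_pos v0 r hpos
          rcases hgl : pre.getLast? with _ | cL
          · exfalso; simp [TopOK, hgl] at htop
          · have hc : cL = ')' ∨ cL = ']' := by simpa [TopOK, hgl] using htop
            have holast : ¬ (pre.getLast? = some t) := by
              rw [hgl]
              intro hEq
              injection hEq with hEq
              rcases hc with h' | h' <;> rcases ho with h'' | h'' <;>
                simp [h', h''] at hEq
            rw [hget, if_neg holast, hdiv, if_neg (by omega)]
            have h := ih (pre ++ [cl]) (Sum.inr ((altPopInts (Sum.inr v0 :: r)).1 * k) :: st')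
              (by
                intro v hv
                rcases List.mem_cons.1 hv with h | h
                · injection h with h
                  have := hinner
                  nlinarith
                · exact hpos' v h)
              (by
                rcases hcl with h | h <;>
                  simp [TopOK, List.getLast?_append, h])
            simp only [List.append_assoc, List.singleton_append, List.length_append,
              List.length_cons, List.length_nil, smark, scontrib, sprod] at h
            rw [hms] at h
            have hcon : scontrib (Sum.inr v0 :: r)
                = (altPopInts (Sum.inr v0 :: r)).1 * k * sprod st' + scontrib st' := by
              rw [scontrib_pop (Sum.inr v0 :: r), hpop, hsp]
              simp only [scontrib]
              ring
            rw [hcon]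
            exact h
    · show (if t ≠ o then (0:Int) else _) = (if t = o then _ else 0)
      rw [if_pos ht, if_neg ht]
lemma loop_eq (rem : List Char) : ∀ (pre : List Char) (st : List (Char ⊕ Int)),
    (∀ v, Sum.inr v ∈ st → 0 < v) → TopOK pre st →
    solutionLoop (pre ++ rem) rem pre.length (smark st) (scontrib st) (sprod st)
      = altLoop rem st := by
  induction rem with
  | nil =>
    intro pre st _ _
    simp only [solutionLoop, altLoop]
    by_cases hm : smark st = []
    · rw [if_neg (by simp [hm]), if_neg (by simp [(any_isLeft_iff st).2 hm])]
      rw [foldl_sum_no_marks st hm 0]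
      ring
    · rw [if_pos (by simp [hm]),
        if_pos (by cases hany : st.any Sum.isLeft with
          | false => exact absurd ((any_isLeft_iff st).1 hany) hm
          | true => rfl)]
  | cons c rest ih =>
    intro pre st hpos htop
    simp only [solutionLoop, altLoop]
    by_cases h1 : c = '('
    · subst h1
      rw [if_pos rfl, if_pos (Or.inl rfl)]
      have h := ih (pre ++ ['(']) (Sum.inl '(' :: st)
        (fun v hv => hpos v (by simpa using hv))
        (by simp [TopOK, List.getLast?_append])
      simp only [List.append_assoc, List.singleton_append, List.length_append,
        List.length_cons, List.length_nil, smark, scontrib, sprod, wt] at h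
      rw [show sprod st * 2 = 2 * sprod st from by ring]
      exact h
    · rw [if_neg h1]
      by_cases h2 : c = ')'
      · subst h2
        rw [if_pos rfl, if_neg (show ¬(')' = '(' ∨ ')' = '[') by decide),
          if_pos (show (')' = ')' ∨ ')' = ']') from Or.inl rfl),
          if_pos (show ')' = ')' from rfl)]
        exact close_case rest pre ')' '(' 2 (by norm_num) (by decide) (Or.inl rfl)
          (Or.inl rfl) st hpos htop ih
      · rw [if_neg h2]
        by_cases h3 : c = '['
        · subst h3
          rw [if_pos rfl, if_pos (Or.inr rfl)]
          have h := ih (pre ++ ['[']) (Sum.inl '[' :: st)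
            (fun v hv => hpos v (by simpa using hv))
            (by simp [TopOK, List.getLast?_append])
          simp only [List.append_assoc, List.singleton_append, List.length_append,
            List.length_cons, List.length_nil, smark, scontrib, sprod, wt] at h
          rw [show sprod st * 3 = 3 * sprod st from by ring]
          exact h
        · rw [if_neg h3]
          by_cases h4 : c = ']'
          · subst h4
            rw [if_pos rfl, if_neg (show ¬(']' = '(' ∨ ']' = '[') by decide),
              if_pos (show (']' = ')' ∨ ']' = ']') from Or.inr rfl),
              if_neg (show ¬(']' = ')') by decide)]
            exact close_case rest pre ']' '[' 3 (by norm_num) (by decide) (Or.inr rfl)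
              (Or.inr rfl) st hpos htop ih
          · rw [if_neg h4, if_neg (show ¬(c = '(' ∨ c = '[') by tauto),
              if_neg (show ¬(c = ')' ∨ c = ']') by tauto)]

-- ===== VERDICT (by name: the statement is the Claim_ definition above) =====
theorem solution_spec : Claim_equal_solution := by
  intro s _
  unfold Spec_solution solution solution_alt
  have h := loop_eq s.toList [] [] (by simp) (by simp [TopOK])
  simpa [smark, scontrib, sprod] using h
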